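-- pv_equiv track=rewrite | github.com/AbbyGeek/CodeWars | 7kyu/SequenceSum.py | sum_of_n
-- ===== SOURCE A (Python) =====
-- def sum_of_n(n):
--   ans = []
--   entry = 0
--   if n < 0:
--       for x in range(0,(n-1)*-1):
--           ans.append(entry*-1)
--           entry += len(ans)
--   for x in range(0,n+1):
--       ans.append(entry)
--       entry += len(ans)
--   return ans
-- ===== SOURCE B (Python) =====
-- def sum_of_n(n):
--     sign = 1 if n >= 0 else -1
--     return [sign * k * (k + 1) // 2 for k in range(abs(n) + 1)]
-- ===== Notes on version B (the rewrite author's own statement) =====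
-- stated objective: simpler
-- what changed: Replaces A's two accumulator loops (running entry grown by len(ans)) with a single comprehension computing each element by the closed form sign*k*(k+1)//2.
import Mathlib
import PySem

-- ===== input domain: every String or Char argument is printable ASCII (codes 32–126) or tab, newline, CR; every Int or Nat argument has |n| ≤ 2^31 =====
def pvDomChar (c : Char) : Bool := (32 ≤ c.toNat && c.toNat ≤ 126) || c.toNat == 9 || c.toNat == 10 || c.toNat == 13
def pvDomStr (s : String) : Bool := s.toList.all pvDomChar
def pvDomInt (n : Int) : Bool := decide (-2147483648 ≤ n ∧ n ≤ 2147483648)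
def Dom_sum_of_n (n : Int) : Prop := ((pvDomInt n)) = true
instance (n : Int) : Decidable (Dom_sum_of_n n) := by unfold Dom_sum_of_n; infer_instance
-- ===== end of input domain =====

-- Header: B computes each element by the closed form sign*k*(k+1)//2 in one comprehension
-- instead of A's two accumulator loops; objective: simpler.


-- ===== PORT A =====
-- body of A's negative-branch loop: ans.append(entry*-1); entry += len(ans)
def sumStepNeg (s : List Int × Int) (_x : Int) : List Int × Int :=
  let ans := s.1 ++ [s.2 * (-1)]
  (ans, s.2 + (ans.length : Int))

-- body of A's second loop: ans.append(entry); entry += len(ans)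
def sumStepPos (s : List Int × Int) (_x : Int) : List Int × Int :=
  let ans := s.1 ++ [s.2]
  (ans, s.2 + (ans.length : Int))

def sum_of_n (n : Int) : List Int :=
  let s : List Int × Int := ([], 0)
  let s := if n < 0 then (PySem.List.pyRange 0 ((n - 1) * (-1)) 1).foldl sumStepNeg s else s
  ((PySem.List.pyRange 0 (n + 1) 1).foldl sumStepPos s).1

-- ===== PORT B =====
def sum_of_n_alt (n : Int) : List Int :=
  let sign : Int := if n ≥ 0 then 1 else -1
  (PySem.List.pyRange 0 ((n.natAbs : Int) + 1) 1).map
    (fun k => PySem.Int.floordiv (sign * k * (k + 1)) 2)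

-- ===== PRECONDITION & SPEC =====
def Spec_sum_of_n (n : Int) (out : List Int) : Prop := out = sum_of_n_alt n
instance (n : Int) (out : List Int) : Decidable (Spec_sum_of_n n out) := by unfold Spec_sum_of_n; infer_instance

-- ===== CLAIM (what is proved, stated in full; the proofs are below) =====
def Claim_equal_sum_of_n : Prop := ∀ (n : Int), Dom_sum_of_n n → Spec_sum_of_n n (sum_of_n n)

-- ===== LEMMAS AND PROOFS =====

-- triangular numbers, recursively
def triN : Nat → Nat
  | 0 => 0
  | k + 1 => triN k + (k + 1)

def triZ (k : Nat) : Int := (triN k : Int)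

theorem triZ_succ (k : Nat) : triZ (k + 1) = triZ k + (k + 1) := by
  simp [triZ, triN]

theorem two_mul_triZ (k : Nat) : 2 * triZ k = (k : Int) * (k + 1) := by
  induction k with
  | zero => simp [triZ, triN]
  | succ k ih =>
    rw [triZ_succ]
    push_cast
    push_cast at ih
    nlinarith [ih]

-- one step of A's loops on the invariant state
theorem stepPos_inv (j : Nat) (x : Int) :
    sumStepPos ((List.range j).map triZ, triZ j) x
      = ((List.range (j + 1)).map triZ, triZ (j + 1)) := by
  simp [sumStepPos, List.range_succ, triZ_succ]

theorem stepNeg_inv (j : Nat) (x : Int) :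
    sumStepNeg ((List.range j).map (fun k => -triZ k), triZ j) x
      = ((List.range (j + 1)).map (fun k => -triZ k), triZ (j + 1)) := by
  simp [sumStepNeg, List.range_succ, triZ_succ]

theorem foldPos_inv (L : List Int) (j : Nat) :
    L.foldl sumStepPos ((List.range j).map triZ, triZ j)
      = ((List.range (j + L.length)).map triZ, triZ (j + L.length)) := by
  induction L generalizing j with
  | nil => simp
  | cons x t ih =>
    simp only [List.foldl_cons, stepPos_inv, ih, List.length_cons]
    rw [show j + (t.length + 1) = j + 1 + t.length from by omega]

theorem foldNeg_inv (L : List Int) (j : Nat) :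
    L.foldl sumStepNeg ((List.range j).map (fun k => -triZ k), triZ j)
      = ((List.range (j + L.length)).map (fun k => -triZ k), triZ (j + L.length)) := by
  induction L generalizing j with
  | nil => simp
  | cons x t ih =>
    simp only [List.foldl_cons, stepNeg_inv, ih, List.length_cons]
    rw [show j + (t.length + 1) = j + 1 + t.length from by omega]

-- closed form of A
theorem sum_of_n_eq (n : Int) :
    sum_of_n n = (List.range (n.natAbs + 1)).map
      (fun k => (if 0 ≤ n then 1 else -1) * triZ k) := by
  unfold sum_of_n
  dsimp only
  by_cases h : n < 0
  · have h2 : (n : Int) + 1 ≤ 0 := by omega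
    rw [if_pos h, PySem.List.pyRange_one_eq_nil (show (n:Int)+1 ≤ 0 by omega)]
    simp only [List.foldl_nil]
    have h0 : (List.range 0).map (fun k => -triZ k) = ([] : List Int) := by simp
    have e : (([] : List Int), (0 : Int)) = ((List.range 0).map (fun k => -triZ k), triZ 0) := by
      simp [triZ, triN]
    rw [e, foldNeg_inv]
    have hl : (PySem.List.pyRange 0 ((n - 1) * (-1)) 1).length = n.natAbs + 1 := by
      rw [PySem.List.length_pyRange_one]; omega
    rw [hl]
    simp only [if_neg (by omega : ¬ (0:Int) ≤ n), Nat.zero_add]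
    apply List.map_congr_left
    intro k _
    ring
  · have h1 : ¬ n < 0 := h
    simp only [if_neg h1]
    have e : (([] : List Int), (0 : Int)) = ((List.range 0).map triZ, triZ 0) := by
      simp [triZ, triN]
    rw [e, foldPos_inv]
    have hl : (PySem.List.pyRange 0 (n + 1) 1).length = n.natAbs + 1 := by
      rw [PySem.List.length_pyRange_one]; omega
    rw [hl]
    simp only [if_pos (by omega : (0:Int) ≤ n)]
    simp

-- closed form of B
theorem sum_of_n_alt_eq (n : Int) :
    sum_of_n_alt n = (List.range (n.natAbs + 1)).map
      (fun k => (if 0 ≤ n then 1 else -1) * triZ k) := by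
  unfold sum_of_n_alt
  have : ((n.natAbs : Int) + 1) = ((n.natAbs + 1 : Nat) : Int) := by push_cast; ring
  rw [this, PySem.List.pyRange_zero_natCast, List.map_map]
  apply List.map_congr_left
  intro k _
  simp only [Function.comp]
  set s : Int := if n ≥ 0 then 1 else -1 with hs
  have key : s * (k : Int) * ((k : Int) + 1) = (s * triZ k) * 2 := by
    have h2 := two_mul_triZ k
    rw [mul_assoc, ← h2]; ring
  rw [key]
  rcases (PySem.Int.floordiv_eq_iff_of_pos (a := (s * triZ k) * 2) (b := 2)
    (q := s * triZ k) (by omega)).mpr ⟨by nlinarith, by nlinarith⟩ with h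
  exact h

-- ===== VERDICT (by name: the statement is the Claim_ definition above) =====
theorem sum_of_n_spec : Claim_equal_sum_of_n := by
  intro n _
  unfold Spec_sum_of_n
  rw [sum_of_n_eq, sum_of_n_alt_eq]
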